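-- pv_equiv track=rewrite | github.com/bullitt186/ha-stiebel-control | helperscripts/expand_signal_names.py | split_fragment
-- ===== SOURCE A (Python) =====
-- ABBREV_LIST = [
--     ("AUFNAHMELEISTUNG", "Aufnahmeleistung"),  # 16 chars
--     ("LUEFTUNGSSTUFE", "Lüftungsstufe"),  # 14 chars
--     ("LEISTUNGSZWANG", "Leistungszwang"),   # 14 chars
--     ("FEHLERMELDUNG", "Fehlermeldung"),# 13 chars
--     ("VOLUMENSTROM", "Volumenstrom"),  # 12 chars
--     ("QUELLENPUMPE", "Quellenpumpe"),  # 12 chars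
--     ("STUETZSTELLE", "Stützstelle"),   # 12 chars
--     ("HILFSKESSEL", "Hilfskessel"),    # 11 chars
--     ("BETRIEBSART", "Betriebsart"),    # 11 chars
--     ("VERDAMPFER", "Verdampfer"),      # 10 chars
--     ("VERDICHTER", "Verdichter"),      # 10 chars
--     ("DURCHFLUSS", "Durchfluss"),      # 10 chars
--     ("TEMPERATUR", "Temperatur"),      # 10 chars
--     ("TEMPORALE", "Temporale"),        # 9 chars
--     ("RUECKLAUF", "Rücklauf"),         # 9 chars
--     ("LAUFZEIT", "Laufzeit"),          # 8 chars
--     ("EINSTELL", "Einstellung"),       # 8 chars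
--     ("LEISTUNG", "Leistung"),          # 8 chars
--     ("KUEHLUNG", "Kühlung"),           # 8 chars
--     ("BIVALENT", "Bivalent"),          # 8 chars
--     ("PARALLEL", "Parallel"),          # 8 chars
--     ("FREQUENZ", "Frequenz"),          # 8 chars
--     ("DREHZAHL", "Drehzahl"),          # 8 chars
--     ("SPEICHER", "Speicher"),          # 8 chars
--     ("SPANNUNG", "Spannung"),          # 8 chars
--     ("VORLAUF", "Vorlauf"),            # 7 chars
--     ("SAMMLER", "Sammler"),            # 7 chars
--     ("BETRIEB", "Betrieb"),            # 7 chars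
--     ("HEIZUNG", "Heizung"),            # 7 chars
--     ("ERTRAG", "Ertrag"),              # 6 chars
--     ("AUSSEN", "Außen"),               # 6 chars
--     ("MINUTE", "Minute"),               # 6 chars
--     ("SOCKEL", "Sockel"),              # 6 chars
--     ("KESSEL", "Kessel"),              # 6 chars
--     ("DAUER", "Dauer"),                # 5 chars
--     ("DRUCK", "Druck"),                # 5 chars
--     ("STROM", "Strom"),                # 5 chars
--     ("LUEFT", "Lüftung"),              # 5 chars
--     ("PUMPE", "Pumpe"),                # 5 chars
--     ("VERD", "Verdichter"),            # 4 chars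
--     ("TEMP", "Temperatur"),            # 4 chars
--     ("HEIZ", "Heizung"),               # 4 chars
--     ("RAUM", "Raum"),                  # 4 chars
--     ("SOLL", "Soll"),                  # 4 chars
--     ("MAX", "Maximum"),                # 3 chars
--     ("MIN", "Minimum"),                # 3 chars
--     ("SUM", "Summe"),                  # 3 chars
--     ("TAG", "Tag"),                    # 3 chars
--     ("IST", "Ist"),                    # 3 chars
--     ("FKT", "Funktion"),               # 3 chars
--     ("HZG", "Heizung"),                # 3 chars
--     ("WW", "Warmwasser"),              # 2 chars
--     ("WP", "Wärmepumpe"),              # 2 chars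
--     ("EL", "Elektrisch"),              # 2 chars
--     ("LZ", "Laufzeit")                 # 2 chars
-- ]
--
-- def split_fragment(fragment: str) -> str:
--     """
--     Recursively split a signal name fragment using abbrevList.
--     Returns expanded friendly name with spaces between recognized parts.
--     """
--     # Stop if fragment is too short or empty
--     if len(fragment) <= 1:
--         return fragment
--
--     # Convert to uppercase for case-insensitive search
--     upper_fragment = fragment.upper()
--
--     # Try each abbreviation (already sorted longest first)
--     for abbrev, full in ABBREV_LIST:
--         pos = upper_fragment.find(abbrev)
--         if pos != -1:
--             # Found! Split into left, match, right
--             left = fragment[:pos]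
--             match = full  # Use friendly name
--             right = fragment[pos + len(abbrev):]
--
--             # Recursively process left and right parts
--             processed_left = split_fragment(left) if left else ""
--             processed_right = split_fragment(right) if right else ""
--
--             # Combine with spaces
--             result_parts = []
--             if processed_left:
--                 result_parts.append(processed_left)
--             result_parts.append(match)
--             if processed_right:
--                 result_parts.append(processed_right)
--
--             return " ".join(result_parts)
--
--     # No match found, return fragment as-is
--     return fragment
-- ===== SOURCE B (Python) =====
-- ABBREV_LIST = [
--     ("AUFNAHMELEISTUNG", "Aufnahmeleistung"),
--     ("LUEFTUNGSSTUFE", "Lüftungsstufe"),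
--     ("LEISTUNGSZWANG", "Leistungszwang"),
--     ("FEHLERMELDUNG", "Fehlermeldung"),
--     ("VOLUMENSTROM", "Volumenstrom"),
--     ("QUELLENPUMPE", "Quellenpumpe"),
--     ("STUETZSTELLE", "Stützstelle"),
--     ("HILFSKESSEL", "Hilfskessel"),
--     ("BETRIEBSART", "Betriebsart"),
--     ("VERDAMPFER", "Verdampfer"),
--     ("VERDICHTER", "Verdichter"),
--     ("DURCHFLUSS", "Durchfluss"),
--     ("TEMPERATUR", "Temperatur"),
--     ("TEMPORALE", "Temporale"),
--     ("RUECKLAUF", "Rücklauf"),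
--     ("LAUFZEIT", "Laufzeit"),
--     ("EINSTELL", "Einstellung"),
--     ("LEISTUNG", "Leistung"),
--     ("KUEHLUNG", "Kühlung"),
--     ("BIVALENT", "Bivalent"),
--     ("PARALLEL", "Parallel"),
--     ("FREQUENZ", "Frequenz"),
--     ("DREHZAHL", "Drehzahl"),
--     ("SPEICHER", "Speicher"),
--     ("SPANNUNG", "Spannung"),
--     ("VORLAUF", "Vorlauf"),
--     ("SAMMLER", "Sammler"),
--     ("BETRIEB", "Betrieb"),
--     ("HEIZUNG", "Heizung"),
--     ("ERTRAG", "Ertrag"),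
--     ("AUSSEN", "Außen"),
--     ("MINUTE", "Minute"),
--     ("SOCKEL", "Sockel"),
--     ("KESSEL", "Kessel"),
--     ("DAUER", "Dauer"),
--     ("DRUCK", "Druck"),
--     ("STROM", "Strom"),
--     ("LUEFT", "Lüftung"),
--     ("PUMPE", "Pumpe"),
--     ("VERD", "Verdichter"),
--     ("TEMP", "Temperatur"),
--     ("HEIZ", "Heizung"),
--     ("RAUM", "Raum"),
--     ("SOLL", "Soll"),
--     ("MAX", "Maximum"),
--     ("MIN", "Minimum"),
--     ("SUM", "Summe"),
--     ("TAG", "Tag"),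
--     ("IST", "Ist"),
--     ("FKT", "Funktion"),
--     ("HZG", "Heizung"),
--     ("WW", "Warmwasser"),
--     ("WP", "Wärmepumpe"),
--     ("EL", "Elektrisch"),
--     ("LZ", "Laufzeit")
-- ]
--
--
-- def split_fragment(fragment: str) -> str:
--     """Iterative re-implementation: an explicit work stack of ('frag', s) /
--     ('emit', token) items replaces the recursion; tokens are collected into one
--     flat list and joined once at the end."""
--     if len(fragment) <= 1:
--         return fragment
--
--     parts = []
--     stack = [("frag", fragment)]
--     while stack:
--         kind, s = stack.pop()
--         if kind == "emit":
--             parts.append(s)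
--         elif len(s) <= 1:
--             if s:
--                 parts.append(s)
--         else:
--             upper_s = s.upper()
--             for abbrev, full in ABBREV_LIST:
--                 pos = upper_s.find(abbrev)
--                 if pos != -1:
--                     left = s[:pos]
--                     right = s[pos + len(abbrev):]
--                     # push in reverse of output order: LIFO yields left, match, right
--                     if right:
--                         stack.append(("frag", right))
--                     stack.append(("emit", full))
--                     if left:
--                         stack.append(("frag", left))
--                     break
--             else:
--                 parts.append(s)
--     return " ".join(parts)
-- ===== Notes on version B (the rewrite author's own statement) =====
-- stated objective: alternative
-- what changed: The recursion is replaced by an explicit LIFO work stack of frag/emit items that collects all tokens into one flat list joined once at the end, instead of recursive calls whose results are re-joined at every level.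
import Mathlib
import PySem

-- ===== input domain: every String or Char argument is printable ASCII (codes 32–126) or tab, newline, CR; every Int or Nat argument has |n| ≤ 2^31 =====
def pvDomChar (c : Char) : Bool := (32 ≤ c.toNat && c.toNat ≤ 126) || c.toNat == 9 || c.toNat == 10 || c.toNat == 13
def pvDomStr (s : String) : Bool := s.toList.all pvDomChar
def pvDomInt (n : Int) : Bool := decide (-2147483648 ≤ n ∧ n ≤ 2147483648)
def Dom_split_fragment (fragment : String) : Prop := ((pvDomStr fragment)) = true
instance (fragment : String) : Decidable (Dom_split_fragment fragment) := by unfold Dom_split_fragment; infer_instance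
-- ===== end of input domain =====

-- B re-implements the recursive expansion with an explicit LIFO work stack and one flat token
-- list joined once at the end (same results; different decomposition, no speed claim).
-- Both ports carry a fuel parameter purely as a totality guard (the stated fuel always suffices).

-- The module constant ABBREV_LIST, shared by both programs.
def abbrevList : List (String × String) := [
  ("AUFNAHMELEISTUNG", "Aufnahmeleistung"), ("LUEFTUNGSSTUFE", "Lüftungsstufe"),
  ("LEISTUNGSZWANG", "Leistungszwang"), ("FEHLERMELDUNG", "Fehlermeldung"),
  ("VOLUMENSTROM", "Volumenstrom"), ("QUELLENPUMPE", "Quellenpumpe"),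
  ("STUETZSTELLE", "Stützstelle"), ("HILFSKESSEL", "Hilfskessel"),
  ("BETRIEBSART", "Betriebsart"), ("VERDAMPFER", "Verdampfer"),
  ("VERDICHTER", "Verdichter"), ("DURCHFLUSS", "Durchfluss"),
  ("TEMPERATUR", "Temperatur"), ("TEMPORALE", "Temporale"),
  ("RUECKLAUF", "Rücklauf"), ("LAUFZEIT", "Laufzeit"),
  ("EINSTELL", "Einstellung"), ("LEISTUNG", "Leistung"),
  ("KUEHLUNG", "Kühlung"), ("BIVALENT", "Bivalent"),
  ("PARALLEL", "Parallel"), ("FREQUENZ", "Frequenz"),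
  ("DREHZAHL", "Drehzahl"), ("SPEICHER", "Speicher"),
  ("SPANNUNG", "Spannung"), ("VORLAUF", "Vorlauf"),
  ("SAMMLER", "Sammler"), ("BETRIEB", "Betrieb"),
  ("HEIZUNG", "Heizung"), ("ERTRAG", "Ertrag"),
  ("AUSSEN", "Außen"), ("MINUTE", "Minute"),
  ("SOCKEL", "Sockel"), ("KESSEL", "Kessel"),
  ("DAUER", "Dauer"), ("DRUCK", "Druck"),
  ("STROM", "Strom"), ("LUEFT", "Lüftung"),
  ("PUMPE", "Pumpe"), ("VERD", "Verdichter"),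
  ("TEMP", "Temperatur"), ("HEIZ", "Heizung"),
  ("RAUM", "Raum"), ("SOLL", "Soll"),
  ("MAX", "Maximum"), ("MIN", "Minimum"),
  ("SUM", "Summe"), ("TAG", "Tag"),
  ("IST", "Ist"), ("FKT", "Funktion"),
  ("HZG", "Heizung"), ("WW", "Warmwasser"),
  ("WP", "Wärmepumpe"), ("EL", "Elektrisch"),
  ("LZ", "Laufzeit")]

-- ===== PORT A =====
-- A's `for abbrev, full in ABBREV_LIST` loop with its early return;
-- `rec` is the recursive call split_fragment
def tryAF (rec : List Char → List Char) (cs u : List Char) : List (String × String) → List Char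
  | [] => cs
  | (ab, full) :: rest =>
    if PySem.Chars.find u ab.toList = -1 then tryAF rec cs u rest
    else
      let pos := PySem.Chars.find u ab.toList
      let left := PySem.List.slice cs none (some pos)
      let right := PySem.List.slice cs (some (pos + (ab.toList.length : Int))) none
      let pl := if left ≠ [] then rec left else []
      let pr := if right ≠ [] then rec right else []
      PySem.Chars.join [' '] ((if pl ≠ [] then [pl] else []) ++ [full.toList] ++ (if pr ≠ [] then [pr] else []))

-- the body of Python A's split_fragment (fuel is only a totality guard;
-- every recursive call is on a strictly shorter list, so len + 1 fuel never runs out)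
def goAF : Nat → List Char → List Char
  | 0, cs => cs
  | fuel + 1, cs =>
    if cs.length ≤ 1 then cs
    else tryAF (fun t => goAF fuel t) cs (PySem.Chars.upper cs) abbrevList

def split_fragment (fragment : String) : String :=
  String.ofList (goAF (fragment.toList.length + 1) fragment.toList)

-- ===== PORT B =====
-- a work item: expand a fragment, or emit a literal token
inductive WItem
  | frag : List Char → WItem
  | emit : List Char → WItem
deriving DecidableEq, Repr

-- B's inner `for … else` scan: the first matching table entry as (pos, len(abbrev), full)
def firstMatch (u : List Char) : List (String × String) → Option (Int × Nat × List Char)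
  | [] => none
  | (ab, full) :: rest =>
    if PySem.Chars.find u ab.toList = -1 then firstMatch u rest
    else some (PySem.Chars.find u ab.toList, ab.toList.length, full.toList)

-- B's while loop over the explicit stack (fuel is only a totality guard: the total stack
-- weight strictly decreases with every iteration, so the stated fuel never runs out)
def loopBF : Nat → List WItem → List (List Char) → List (List Char)
  | 0, _, parts => parts
  | fuel + 1, stack, parts =>
    match stack with
    | [] => parts
    | .emit t :: rest => loopBF fuel rest (parts ++ [t])
    | .frag s :: rest =>
      if s.length ≤ 1 then
        loopBF fuel rest (if s ≠ [] then parts ++ [s] else parts)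
      else
        match firstMatch (PySem.Chars.upper s) abbrevList with
        | none => loopBF fuel rest (parts ++ [s])
        | some (p, k, full) =>
          let left := PySem.List.slice s none (some p)
          let right := PySem.List.slice s (some (p + (k : Int))) none
          loopBF fuel ((if left ≠ [] then [WItem.frag left] else []) ++ [WItem.emit full] ++
            (if right ≠ [] then [WItem.frag right] else []) ++ rest) parts

def split_fragment_alt (fragment : String) : String :=
  if PySem.Str.len fragment ≤ 1 then fragment
  else String.ofList (PySem.Chars.join [' ']
    (loopBF (2 * fragment.toList.length + 2) [WItem.frag fragment.toList] []))

-- ===== PRECONDITION & SPEC =====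
def Spec_split_fragment (fragment : String) (out : String) : Prop := out = split_fragment_alt fragment
instance (fragment : String) (out : String) : Decidable (Spec_split_fragment fragment out) := by unfold Spec_split_fragment; infer_instance

-- ===== CLAIM (what is proved, stated in full; the proofs are below) =====
def Claim_equal_split_fragment : Prop := ∀ (fragment : String), Dom_split_fragment fragment → Spec_split_fragment fragment (split_fragment fragment)

-- ===== LEMMAS AND PROOFS =====

-- Every abbreviation in the table has length ≥ 2.
theorem abbrev_len : ∀ q ∈ abbrevList, 2 ≤ q.1.toList.length := by decide

theorem abbrev_full_ne : ∀ q ∈ abbrevList, q.2.toList ≠ [] := by decide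

-- A successful s.find(sub) lies in [0, len - sub.len].
theorem find_pos_bounds (u ab : List Char) (hne : ¬ PySem.Chars.find u ab = -1) :
    0 ≤ PySem.Chars.find u ab ∧ (PySem.Chars.find u ab).toNat + ab.length ≤ u.length := by
  have h1 := PySem.Chars.neg_one_le_find (s := u) (sub := ab)
  have h0 : 0 ≤ PySem.Chars.find u ab := by omega
  have hp := (PySem.Chars.find_spec h0).1
  have hle := hp.length_le
  have h2 := PySem.Chars.find_le_length (s := u) (sub := ab)
  simp only [List.length_drop] at hle
  exact ⟨h0, by omega⟩

-- a successful firstMatch respects the same bounds as find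
theorem firstMatch_spec {u : List Char} {p : Int} {k : Nat} {full : List Char} :
    ∀ {l : List (String × String)}, (∀ q ∈ l, 2 ≤ q.1.toList.length) →
    firstMatch u l = some (p, k, full) → 0 ≤ p ∧ 2 ≤ k ∧ p.toNat + k ≤ u.length
  | [], _, h => by simp [firstMatch] at h
  | (ab, fu) :: rest, hl, h => by
    rw [firstMatch] at h
    split at h
    · exact firstMatch_spec (fun q hq => hl q (List.mem_cons_of_mem _ hq)) h
    · rename_i hne
      obtain ⟨h0, hb⟩ := find_pos_bounds u ab.toList hne
      have hab : 2 ≤ ab.toList.length := hl (ab, fu) (List.mem_cons_self ..)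
      simp only [Option.some.injEq, Prod.mk.injEq] at h
      obtain ⟨hp, hk2, -⟩ := h
      subst hp; subst hk2
      exact ⟨h0, hab, by omega⟩

-- the full name returned by firstMatch comes from the table
theorem firstMatch_full {u : List Char} {p : Int} {k : Nat} {full : List Char} :
    ∀ {l : List (String × String)}, firstMatch u l = some (p, k, full) → ∃ q ∈ l, full = q.2.toList
  | [], h => by simp [firstMatch] at h
  | (ab, fu) :: rest, h => by
    rw [firstMatch] at h
    split at h
    · obtain ⟨q, hq, hf⟩ := firstMatch_full h
      exact ⟨q, List.mem_cons_of_mem _ hq, hf⟩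
    · simp only [Option.some.injEq, Prod.mk.injEq] at h
      exact ⟨(ab, fu), List.mem_cons_self .., h.2.2.symm⟩

-- the flat token list that A's recursion produces (proof-side characterisation)
def tokens (cs : List Char) : List (List Char) :=
  if cs.length ≤ 1 then (if cs = [] then [] else [cs])
  else
    match h : firstMatch (PySem.Chars.upper cs) abbrevList with
    | none => [cs]
    | some (p, k, full) =>
      tokens (PySem.List.slice cs none (some p)) ++ [full] ++
        tokens (PySem.List.slice cs (some (p + (k : Int))) none)
termination_by cs.length
decreasing_by
  all_goals
  · obtain ⟨h0, hk, hb⟩ := firstMatch_spec abbrev_len h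
    have hu : (PySem.Chars.upper cs).length = cs.length := by simp [PySem.Chars.upper]
    first
    | (rw [PySem.List.slice_to cs h0]; simp only [List.length_take]; omega)
    | (rw [PySem.List.slice_from cs (by omega : (0:Int) ≤ p + (k : Int))]; simp only [List.length_drop]; omega)

theorem tokens_nil : tokens [] = [] := by rw [tokens]; simp

theorem tokens_small {cs : List Char} (h1 : cs.length ≤ 1) (h2 : cs ≠ []) : tokens cs = [cs] := by
  rw [tokens, if_pos h1, if_neg h2]

theorem tokens_none {cs : List Char} (h1 : ¬ cs.length ≤ 1)
    (hm : firstMatch (PySem.Chars.upper cs) abbrevList = none) : tokens cs = [cs] := by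
  rw [tokens, if_neg h1]
  cases hm2 : firstMatch (PySem.Chars.upper cs) abbrevList with
  | none => rfl
  | some t => rw [hm] at hm2; cases hm2

theorem tokens_some {cs : List Char} {p : Int} {k : Nat} {full : List Char} (h1 : ¬ cs.length ≤ 1)
    (hm : firstMatch (PySem.Chars.upper cs) abbrevList = some (p, k, full)) :
    tokens cs = tokens (PySem.List.slice cs none (some p)) ++ [full] ++
      tokens (PySem.List.slice cs (some (p + (k : Int))) none) := by
  rw [tokens, if_neg h1]
  cases hm2 : firstMatch (PySem.Chars.upper cs) abbrevList with
  | none => rw [hm] at hm2; cases hm2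
  | some t =>
    rw [hm] at hm2
    obtain rfl : t = (p, k, full) := by cases hm2; rfl
    rfl

theorem join_append (sep : List Char) (L1 L2 : List (List Char)) (h1 : L1 ≠ []) (h2 : L2 ≠ []) :
    PySem.Chars.join sep (L1 ++ L2) = PySem.Chars.join sep L1 ++ sep ++ PySem.Chars.join sep L2 := by
  induction L1 with
  | nil => exact absurd rfl h1
  | cons a t ih =>
    cases t with
    | nil =>
      cases L2 with
      | nil => exact absurd rfl h2
      | cons b r =>
        simp only [List.singleton_append, PySem.Chars.join_cons_cons, PySem.Chars.join_singleton]
    | cons a2 t2 =>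
      have ih' := ih (by simp)
      simp only [List.cons_append] at ih' ⊢
      rw [PySem.Chars.join_cons_cons sep a a2 (t2 ++ L2), ih',
        PySem.Chars.join_cons_cons sep a a2 t2]
      simp [List.append_assoc]

theorem join_ne_nil (sep : List Char) (L : List (List Char)) (hL : L ≠ []) (h : ∀ t ∈ L, t ≠ []) :
    PySem.Chars.join sep L ≠ [] := by
  cases L with
  | nil => exact absurd rfl hL
  | cons a t =>
    cases t with
    | nil => rw [PySem.Chars.join_singleton]; exact h a (List.mem_cons_self ..)
    | cons b r =>
      rw [PySem.Chars.join_cons_cons]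
      have ha := h a (List.mem_cons_self ..)
      simp [ha]

theorem tokens_ne_nil {cs : List Char} (h : cs ≠ []) : tokens cs ≠ [] := by
  rw [tokens]
  split_ifs with h1
  · simp_all
  · split <;> simp

theorem tokens_mem_ne_nil : ∀ (n : Nat) (cs : List Char), cs.length ≤ n → ∀ t ∈ tokens cs, t ≠ [] := by
  intro n
  induction n with
  | zero =>
    intro cs hcs
    have : cs = [] := List.eq_nil_of_length_eq_zero (by omega)
    subst this
    simp [tokens_nil]
  | succ n ih =>
    intro cs hcs t ht
    rw [tokens] at ht
    split_ifs at ht with h1 h2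
    · simp at ht
    · simp at ht; subst ht; exact h2
    · revert ht
      split
      · intro ht; simp at ht; subst ht
        intro hc; subst hc; simp at h1
      · rename_i p k full hm
        obtain ⟨h0, hk, hb⟩ := firstMatch_spec abbrev_len hm
        have hu : (PySem.Chars.upper cs).length = cs.length := by simp [PySem.Chars.upper]
        have hll : (PySem.List.slice cs none (some p)).length ≤ n := by
          rw [PySem.List.slice_to cs h0]; simp only [List.length_take]; omega
        have hrl : (PySem.List.slice cs (some (p + (k : Int))) none).length ≤ n := by
          rw [PySem.List.slice_from cs (by omega : (0:Int) ≤ p + (k : Int))]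
          simp only [List.length_drop]; omega
        intro ht
        simp only [List.mem_append, List.mem_singleton] at ht
        rcases ht with (ht | ht) | ht
        · exact ih _ hll t ht
        · subst ht
          obtain ⟨q, hq, hf⟩ := firstMatch_full hm
          rw [hf]; exact abbrev_full_ne q hq
        · exact ih _ hrl t ht

-- A's abbreviation loop, characterised through firstMatch
theorem tryAF_eq (rec : List Char → List Char) (cs u : List Char) :
    ∀ (l : List (String × String)),
    tryAF rec cs u l =
      match firstMatch u l with
      | none => cs
      | some (p, k, full) =>
        (fun pl pr => PySem.Chars.join [' ']
            ((if pl ≠ [] then [pl] else []) ++ [full] ++ (if pr ≠ [] then [pr] else [])))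
          (if PySem.List.slice cs none (some p) ≠ []
            then rec (PySem.List.slice cs none (some p)) else [])
          (if PySem.List.slice cs (some (p + (k : Int))) none ≠ []
            then rec (PySem.List.slice cs (some (p + (k : Int))) none) else []) := by
  intro l
  induction l with
  | nil => rw [tryAF, firstMatch]
  | cons q rest ih =>
    obtain ⟨ab, full⟩ := q
    rw [tryAF, firstMatch]
    by_cases hpos : PySem.Chars.find u ab.toList = -1
    · simp only [hpos, if_pos]
      exact ih
    · simp only [hpos, if_neg, not_false_iff]

-- A computes the space-join of the flat token list
theorem goAF_eq_join : ∀ (fuel : Nat) (cs : List Char), cs.length < fuel →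
    goAF fuel cs = PySem.Chars.join [' '] (tokens cs) := by
  intro fuel
  induction fuel with
  | zero => intro cs hcs; omega
  | succ n ih =>
    intro cs hcs
    rw [goAF]
    split_ifs with h1
    · by_cases h2 : cs = []
      · subst h2; rw [tokens_nil, PySem.Chars.join_nil]
      · rw [tokens_small h1 h2, PySem.Chars.join_singleton]
    · rw [tryAF_eq]
      cases hm : firstMatch (PySem.Chars.upper cs) abbrevList with
      | none => rw [tokens_none h1 hm, PySem.Chars.join_singleton]
      | some t =>
        obtain ⟨p, k, full⟩ := t
        simp only
        rw [tokens_some h1 hm]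
        obtain ⟨h0, hk, hb⟩ := firstMatch_spec abbrev_len hm
        have hu : (PySem.Chars.upper cs).length = cs.length := by simp [PySem.Chars.upper]
        set left := PySem.List.slice cs none (some p) with hLdef
        set right := PySem.List.slice cs (some (p + (k : Int))) none with hRdef
        have hll : left.length < n := by
          rw [hLdef, PySem.List.slice_to cs h0]; simp only [List.length_take]; omega
        have hrl : right.length < n := by
          rw [hRdef, PySem.List.slice_from cs (by omega : (0:Int) ≤ p + (k : Int))]
          simp only [List.length_drop]; omega
        by_cases hL : left = [] <;> by_cases hR : right = []
        · rw [hL, hR, tokens_nil]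
          simp
        · have hBr : goAF n right = PySem.Chars.join [' '] (tokens right) := ih _ hrl
          have hrne : PySem.Chars.join [' '] (tokens right) ≠ [] :=
            join_ne_nil _ _ (tokens_ne_nil hR) (tokens_mem_ne_nil right.length _ le_rfl)
          rw [hL, tokens_nil]
          simp only [hR, ne_eq, not_true_eq_false, if_neg, if_pos, hBr, hrne,
            not_false_iff, List.nil_append]
          rw [join_append [' '] [full] (tokens right) (by simp) (tokens_ne_nil hR)]
          simp only [List.singleton_append]
          rw [PySem.Chars.join_cons_cons, PySem.Chars.join_singleton, PySem.Chars.join_singleton]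
        · have hBl : goAF n left = PySem.Chars.join [' '] (tokens left) := ih _ hll
          have hlne : PySem.Chars.join [' '] (tokens left) ≠ [] :=
            join_ne_nil _ _ (tokens_ne_nil hL) (tokens_mem_ne_nil left.length _ le_rfl)
          rw [hR, tokens_nil]
          simp only [hL, ne_eq, not_true_eq_false, if_neg, if_pos, hBl, hlne,
            not_false_iff, List.append_nil]
          rw [join_append [' '] (tokens left) [full] (tokens_ne_nil hL) (by simp)]
          simp only [List.singleton_append]
          rw [PySem.Chars.join_cons_cons, PySem.Chars.join_singleton]
        · have hBl : goAF n left = PySem.Chars.join [' '] (tokens left) := ih _ hll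
          have hBr : goAF n right = PySem.Chars.join [' '] (tokens right) := ih _ hrl
          have hlne : PySem.Chars.join [' '] (tokens left) ≠ [] :=
            join_ne_nil _ _ (tokens_ne_nil hL) (tokens_mem_ne_nil left.length _ le_rfl)
          have hrne : PySem.Chars.join [' '] (tokens right) ≠ [] :=
            join_ne_nil _ _ (tokens_ne_nil hR) (tokens_mem_ne_nil right.length _ le_rfl)
          simp only [hL, hR, ne_eq, hBl, hBr, hlne, hrne, not_false_iff, ite_true]
          rw [List.append_assoc (tokens left) [full] (tokens right)]
          rw [join_append [' '] (tokens left) ([full] ++ tokens right) (tokens_ne_nil hL) (by simp)]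
          rw [join_append [' '] [full] (tokens right) (by simp) (tokens_ne_nil hR)]
          simp [PySem.Chars.join_cons_cons, PySem.Chars.join_singleton, List.append_assoc]

-- termination weight of the work stack
def wWeight : WItem → Nat
  | .frag s => 2 * s.length + 1
  | .emit _ => 1

def stackW (st : List WItem) : Nat := (st.map wWeight).sum

-- the tokens the whole stack will eventually contribute
def flatTokens (st : List WItem) : List (List Char) :=
  st.flatMap (fun i => match i with | .frag s => tokens s | .emit t => [t])

-- B's loop drains the stack into the flat token list (given enough fuel)
theorem loopBF_flat : ∀ (fuel : Nat) (stack : List WItem) (parts : List (List Char)),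
    stackW stack < fuel → loopBF fuel stack parts = parts ++ flatTokens stack := by
  intro fuel
  induction fuel with
  | zero => intro stack parts h; omega
  | succ n ih =>
    intro stack parts hfuel
    cases stack with
    | nil => simp [loopBF, flatTokens]
    | cons i rest =>
      cases i with
      | emit t =>
        rw [loopBF]
        have hw : stackW rest < n := by
          simp only [stackW, List.map_cons, List.sum_cons, wWeight] at hfuel ⊢; omega
        rw [ih rest _ hw]
        simp [flatTokens]
      | frag s =>
        rw [loopBF]
        have hwr : stackW rest < n := by
          simp only [stackW, List.map_cons, List.sum_cons, wWeight] at hfuel ⊢; omega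
        split_ifs with h1 hne
        · rw [ih rest _ hwr]
          simp [flatTokens, tokens_small h1 hne, List.append_assoc]
        · have h2 : s = [] := not_not.mp hne
          subst h2
          rw [ih rest _ hwr]
          simp [flatTokens, tokens_nil]
        · cases hm : firstMatch (PySem.Chars.upper s) abbrevList with
          | none =>
            rw [ih rest _ hwr]
            simp [flatTokens, tokens_none h1 hm, List.append_assoc]
          | some t =>
            obtain ⟨p, k, full⟩ := t
            simp only
            obtain ⟨h0, hk, hb⟩ := firstMatch_spec abbrev_len hm
            have hu : (PySem.Chars.upper s).length = s.length := by simp [PySem.Chars.upper]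
            set left := PySem.List.slice s none (some p) with hLdef
            set right := PySem.List.slice s (some (p + (k : Int))) none with hRdef
            have hlb : left.length ≤ p.toNat := by
              rw [hLdef, PySem.List.slice_to s h0]; simp only [List.length_take]; omega
            have hrb : right.length ≤ s.length - (p.toNat + k) := by
              rw [hRdef, PySem.List.slice_from s (by omega : (0:Int) ≤ p + (k : Int))]
              simp only [List.length_drop]; omega
            have hs2 : 2 ≤ s.length := by omega
            have hwf : stackW ((if left ≠ [] then [WItem.frag left] else []) ++ [WItem.emit full] ++
                (if right ≠ [] then [WItem.frag right] else []) ++ rest) < n := by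
              simp only [stackW, List.map_cons, List.sum_cons, wWeight, List.map_append,
                List.sum_append] at hfuel ⊢
              split_ifs <;> simp [wWeight] <;> omega
            rw [ih _ _ hwf]
            by_cases hL : left = [] <;> by_cases hR : right = [] <;>
              simp [flatTokens, tokens_some h1 hm, ← hLdef, ← hRdef, hL, hR, tokens_nil,
                List.append_assoc]

-- ===== VERDICT (by name: the statement is the Claim_ definition above) =====
theorem split_fragment_spec : Claim_equal_split_fragment := by
  intro fragment _
  show split_fragment fragment = split_fragment_alt fragment
  unfold split_fragment split_fragment_alt
  by_cases h : fragment.toList.length ≤ 1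
  · have hg : goAF (fragment.toList.length + 1) fragment.toList = fragment.toList := by
      rw [goAF]; exact if_pos h
    have hc : PySem.Str.len fragment ≤ 1 := by
      have hlen := PySem.Str.len_eq (s := fragment)
      omega
    rw [hg, if_pos hc, String.ofList_toList]
  · have hc : ¬ PySem.Str.len fragment ≤ 1 := by
      have hlen := PySem.Str.len_eq (s := fragment)
      omega
    rw [if_neg hc]
    have hw : stackW [WItem.frag fragment.toList] < 2 * fragment.toList.length + 2 := by
      simp [stackW, wWeight]
    rw [loopBF_flat _ _ _ hw]
    rw [goAF_eq_join (fragment.toList.length + 1) _ (by omega)]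
    simp [flatTokens]
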